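-- pv_equiv track=rewrite | github.com/SrikanthPagadarai/sionna-dl-6g | mimo_ofdm_neural_receiver/src/read_weights.py | smallest_period
-- ===== SOURCE A (Python) =====
-- def smallest_period(seq):
--     n = len(seq)
--     for p in range(1, n + 1):
--         if n % p != 0:
--             continue
--         ok = True
--         for k in range(p, n):
--             if seq[k] != seq[k % p]:
--                 ok = False
--                 break
--         if ok:
--             return p
--     return None
-- ===== SOURCE B (Python) =====
-- def smallest_period(seq):
--     n = len(seq)
--     for q in range(n, 0, -1):
--         if n % q == 0:
--             p = n // q
--             if seq[p:] == seq[:n - p]: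
--                 return p
--     return None
-- ===== Notes on version B (the rewrite author's own statement) =====
-- stated objective: alternative
-- what changed: A scans candidate lengths p upward over all of 1..n with a modular element-by-element inner check seq[k]==seq[k%p]; B instead loops over complementary divisors q = n..1 downward, skipping non-divisors, and tests p = n//q by the slice-shift equality seq[p:] == seq[:n-p], returning on the first hit.
import Mathlib
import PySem

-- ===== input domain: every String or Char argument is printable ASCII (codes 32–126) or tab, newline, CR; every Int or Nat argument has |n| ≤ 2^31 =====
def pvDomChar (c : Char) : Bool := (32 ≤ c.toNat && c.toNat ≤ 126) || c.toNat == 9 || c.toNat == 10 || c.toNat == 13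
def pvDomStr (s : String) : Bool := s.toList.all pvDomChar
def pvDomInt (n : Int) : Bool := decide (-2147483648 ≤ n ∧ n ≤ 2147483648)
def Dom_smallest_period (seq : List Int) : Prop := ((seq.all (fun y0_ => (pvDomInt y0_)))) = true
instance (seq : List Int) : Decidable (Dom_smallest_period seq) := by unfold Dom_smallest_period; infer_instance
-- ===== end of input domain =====

-- B replaces A's ascending scan over all candidate lengths (with a modular element-by-element
-- inner check) by a descending loop over complementary divisors q = n..1, returning p = n//q on
-- the first success of a slice-shift equality test seq[p:] == seq[:n-p]; objective: alternative.

-- ===== PORT A =====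
-- inner loop of A: 'for k in range(p, n): if seq[k] != seq[k % p]: ok = False; break'
-- (indices k are always in range, so getD reads the same element Python does)
def spA_ok (seq : List Int) (p n : Nat) : Bool :=
  (List.range' p (n - p)).all fun k => seq.getD k 0 == seq.getD (k % p) 0

def smallest_period (seq : List Int) : Option Int :=
  Option.map (fun p => ((p : Nat) : Int))
    ((List.range' 1 seq.length).find? fun p => seq.length % p == 0 && spA_ok seq p seq.length)

-- ===== PORT B =====
-- B's loop over q in range(n, 0, -1); seq[p:] = drop p, seq[:n-p] = take (n-p) (0 ≤ p ≤ n)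
def spB_loop (seq : List Int) (n : Nat) : List Nat → Option Int
  | [] => none
  | q :: qs =>
    if n % q == 0 then
      let p := n / q
      if seq.drop p == seq.take (n - p) then some (p : Int) else spB_loop seq n qs
    else spB_loop seq n qs

def smallest_period_alt (seq : List Int) : Option Int :=
  spB_loop seq seq.length (List.range' 1 seq.length).reverse

-- ===== PRECONDITION & SPEC =====
def Spec_smallest_period (seq : List Int) (out : Option Int) : Prop := out = smallest_period_alt seq
instance (seq : List Int) (out : Option Int) : Decidable (Spec_smallest_period seq out) := by unfold Spec_smallest_period; infer_instance

-- ===== CLAIM (what is proved, stated in full; the proofs are below) =====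
def Claim_equal_smallest_period : Prop := ∀ (seq : List Int), Dom_smallest_period seq → Spec_smallest_period seq (smallest_period seq)

-- ===== LEMMAS AND PROOFS =====

-- B's loop is a find? over the candidate list, mapped through p = n / q
theorem spB_loop_eq_find? (seq : List Int) (n : Nat) (qs : List Nat) :
    spB_loop seq n qs =
      (qs.find? fun q => n % q == 0 && (seq.drop (n / q) == seq.take (n - n / q))).map
        (fun q => ((n / q : Nat) : Int)) := by
  induction qs with
  | nil => rfl
  | cons q qs ih =>
    simp only [spB_loop, List.find?]
    by_cases h1 : (n % q == 0) = true
    · by_cases h2 : (seq.drop (n / q) == seq.take (n - n / q)) = true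
      · simp [h1, h2]
      · simp [h1, h2, ih]
    · simp [h1, ih]

-- find? with a conjunctive predicate = find? after filtering on the first conjunct
theorem find?_and_filter {α : Type} (d r : α → Bool) (l : List α) :
    (l.find? fun x => d x && r x) = (l.filter d).find? r := by
  induction l with
  | nil => rfl
  | cons x xs ih =>
    rw [List.find?, List.filter_cons]
    by_cases hd : d x = true
    · rw [if_pos hd, List.find?]
      by_cases hr : r x = true
      · simp only [hd, hr, Bool.and_self]
      · rw [Bool.not_eq_true] at hr
        simp only [hd, hr, Bool.true_and]
        exact ih
    · rw [Bool.not_eq_true] at hd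
      simp only [hd, Bool.false_and]
      exact ih

-- find? only depends on the predicate's values on members
theorem find?_congr_mem {α : Type} (p q : α → Bool) (l : List α)
    (h : ∀ x ∈ l, p x = q x) : l.find? p = l.find? q := by
  induction l with
  | nil => rfl
  | cons x xs ih =>
    have hx : p x = q x := h x (by simp)
    rw [List.find?, List.find?, ← hx]
    by_cases hp : p x = true
    · simp [hp]
    · rw [Bool.not_eq_true] at hp
      simp only [hp]
      exact ih (fun y hy => h y (by simp [hy]))

-- shift-equality restated elementwise
theorem drop_eq_take_iff (seq : List Int) (p : Nat) (hp : p ≤ seq.length) :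
    (seq.drop p = seq.take (seq.length - p)) ↔
      (∀ i, p + i < seq.length → seq.getD (p + i) 0 = seq.getD i 0) := by
  constructor
  · intro h i hi
    have h1 : (seq.drop p)[i]'(by simp; omega) = (seq.take (seq.length - p))[i]'(by simp; omega) := by
      simp only [h]
    simp only [List.getElem_drop, List.getElem_take] at h1
    rw [List.getD_eq_getElem seq 0 hi, List.getD_eq_getElem seq 0 (by omega)]
    exact h1
  · intro h
    apply List.ext_getElem
    · simp only [List.length_drop, List.length_take]; omega
    · intro i h1 h2
      simp only [List.getElem_drop, List.getElem_take]
      have hlt : p + i < seq.length := by simp only [List.length_drop] at h1; omega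
      have h3 := h i hlt
      rw [List.getD_eq_getElem seq 0 hlt, List.getD_eq_getElem seq 0 (by omega)] at h3
      exact h3

-- the modular check, restated elementwise
theorem spA_ok_iff (seq : List Int) (p : Nat) :
    spA_ok seq p seq.length = true ↔
      (∀ k, p ≤ k → k < seq.length → seq.getD k 0 = seq.getD (k % p) 0) := by
  unfold spA_ok
  rw [List.all_eq_true]
  constructor
  · intro h k hk1 hk2
    have := h k (List.mem_range'_1.mpr ⟨hk1, by omega⟩)
    exact beq_iff_eq.mp this
  · intro h k hk
    rw [List.mem_range'_1] at hk
    exact beq_iff_eq.mpr (h k hk.1 (by omega))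

-- modular check ⇔ shift check (for 1 ≤ p ≤ n); the heart of the equivalence
theorem mod_iff_shift (s : Nat → Int) (p n : Nat) (hp : 1 ≤ p) :
    (∀ k, p ≤ k → k < n → s k = s (k % p)) ↔ (∀ i, p + i < n → s (p + i) = s i) := by
  constructor
  · intro h i hi
    rcases Nat.lt_or_ge i p with hlt | hge
    · have h1 := h (p + i) (by omega) hi
      have : (p + i) % p = i := by
        rw [Nat.add_comm, Nat.add_mod_right, Nat.mod_eq_of_lt hlt]
      rw [this] at h1; exact h1
    · have h1 := h (p + i) (by omega) hi
      have h2 := h i hge (by omega)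
      have : (p + i) % p = i % p := by rw [Nat.add_comm, Nat.add_mod_right]
      rw [this] at h1; rw [h1, ← h2]
  · intro h k
    induction k using Nat.strong_induction_on with
    | _ k ih =>
      intro hk1 hk2
      have hk : p + (k - p) = k := by omega
      have h1 : s k = s (k - p) := by
        have := h (k - p) (by omega)
        rwa [hk] at this
      rcases Nat.lt_or_ge (k - p) p with hlt | hge
      · have hmod : k % p = k - p := by
          conv_lhs => rw [← hk, Nat.add_comm, Nat.add_mod_right]
          exact Nat.mod_eq_of_lt hlt
        rw [hmod]; exact h1
      · have h2 := ih (k - p) (by omega) hge (by omega)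
        have hmod : (k - p) % p = k % p := by
          conv_rhs => rw [← hk, Nat.add_comm, Nat.add_mod_right]
        rw [h1, h2, hmod]

-- for candidates 1 ≤ p ≤ n, A's inner check agrees with B's slice check
theorem checks_agree (seq : List Int) (p : Nat) (hp1 : 1 ≤ p) (hp2 : p ≤ seq.length) :
    spA_ok seq p seq.length = (seq.drop p == seq.take (seq.length - p)) := by
  have key : spA_ok seq p seq.length = true ↔ (seq.drop p == seq.take (seq.length - p)) = true := by
    rw [beq_iff_eq, spA_ok_iff, drop_eq_take_iff seq p hp2]
    exact mod_iff_shift (fun i => seq.getD i 0) p seq.length hp1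
  by_cases h : (seq.drop p == seq.take (seq.length - p)) = true
  · rw [h, key.mpr h]
  · rw [Bool.not_eq_true] at h
    rw [h, Bool.eq_false_iff]
    intro hc; rw [key.mp hc] at h; exact Bool.false_ne_true h.symm

-- the ascending divisor list of n (divisors of n among 1..n)
def divList (n : Nat) : List Nat := (List.range' 1 n).filter fun q => n % q == 0

theorem mem_divList (n x : Nat) : x ∈ divList n ↔ (1 ≤ x ∧ x ≤ n ∧ x ∣ n) := by
  unfold divList
  rw [List.mem_filter, List.mem_range'_1]
  constructor
  · rintro ⟨⟨h1, h2⟩, h3⟩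
    exact ⟨h1, by omega, Nat.dvd_of_mod_eq_zero (by simpa using h3)⟩
  · rintro ⟨h1, h2, h3⟩
    exact ⟨⟨h1, by omega⟩, by simp [Nat.dvd_iff_mod_eq_zero.mp h3]⟩

theorem divList_pairwise (n : Nat) : (divList n).Pairwise (· < ·) :=
  (List.pairwise_lt_range' ..).filter _

theorem divList_nodup (n : Nat) : (divList n).Nodup :=
  (divList_pairwise n).imp Nat.ne_of_lt

-- on divisors, q ↦ n / q is strictly antitone
theorem div_lt_div_of_divisors (n a b : Nat) (ha : a ∣ n) (hb : b ∣ n)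
    (ha1 : 1 ≤ a) (hbn : b ≤ n) (hab : a < b) : n / b < n / a := by
  have hb1 : 1 ≤ b := by omega
  have hbpos : 0 < n / b := Nat.div_pos hbn hb1
  have hea : n / a * a = n := Nat.div_mul_cancel ha
  have heb : n / b * b = n := Nat.div_mul_cancel hb
  have h1 : n / b * a < n / b * b := (Nat.mul_lt_mul_left hbpos).mpr hab
  have h2 : n / b * a < n / a * a := by
    calc n / b * a < n / b * b := h1
    _ = n := heb
    _ = n / a * a := hea.symm
  exact Nat.lt_of_mul_lt_mul_right h2

-- q ↦ n / q maps the ascending divisor list onto the divisor list reversed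
theorem map_div_divList (n : Nat) :
    (divList n).map (fun q => n / q) = (divList n).reverse := by
  rcases Nat.eq_zero_or_pos n with h0 | hn
  · subst h0; rfl
  · have hmem : ∀ x, x ∈ (divList n).map (fun q => n / q) ↔ x ∈ divList n := by
      intro x
      rw [List.mem_map]
      constructor
      · rintro ⟨q, hq, rfl⟩
        rw [mem_divList] at hq ⊢
        exact ⟨Nat.div_pos (hq.2.1) hq.1, Nat.div_le_self n q,
          ⟨q, (Nat.div_mul_cancel hq.2.2).symm⟩⟩
      · intro hx
        rw [mem_divList] at hx
        refine ⟨n / x, ?_, Nat.div_div_self hx.2.2 (by omega)⟩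
        rw [mem_divList]
        exact ⟨Nat.div_pos hx.2.1 hx.1, Nat.div_le_self n x,
          ⟨x, (Nat.div_mul_cancel hx.2.2).symm⟩⟩
    have hpw : ((divList n).map (fun q => n / q)).Pairwise (· > ·) := by
      rw [List.pairwise_map]
      have h1 : (divList n).Pairwise (fun a b => a ∈ divList n ∧ b ∈ divList n ∧ a < b) :=
        List.Pairwise.and_mem.mp (divList_pairwise n)
      refine h1.imp ?_
      rintro a b ⟨hma, hmb, hab⟩
      rw [mem_divList] at hma hmb
      exact div_lt_div_of_divisors n a b hma.2.2 hmb.2.2 hma.1 hmb.2.1 hab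
    have hnd1 : ((divList n).map (fun q => n / q)).Nodup := hpw.imp (fun h => Nat.ne_of_gt h)
    have hperm : ((divList n).map (fun q => n / q)).Perm ((divList n).reverse) :=
      ((List.perm_ext_iff_of_nodup hnd1 (divList_nodup n)).mpr hmem).trans
        (List.reverse_perm (divList n)).symm
    have hpw2 : ((divList n).reverse).Pairwise (· > ·) := by
      rw [List.pairwise_reverse]
      exact divList_pairwise n
    exact hperm.eq_of_pairwise (fun a b _ _ g1 g2 => le_antisymm (le_of_lt g2) (le_of_lt g1)) hpw hpw2

-- A as a find? over the divisor list with the slice check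
theorem sideA (seq : List Int) :
    smallest_period seq =
      Option.map (fun p => ((p : Nat) : Int))
        ((divList seq.length).find? fun p =>
          seq.drop p == seq.take (seq.length - p)) := by
  unfold smallest_period
  rw [find?_and_filter]
  congr 1
  apply find?_congr_mem
  intro p hp
  have hp' := (mem_divList seq.length p).mp hp
  exact checks_agree seq p hp'.1 hp'.2.1

-- B as the same find?
theorem sideB (seq : List Int) :
    smallest_period_alt seq =
      Option.map (fun p => ((p : Nat) : Int))
        ((divList seq.length).find? fun p =>
          seq.drop p == seq.take (seq.length - p)) := by
  unfold smallest_period_alt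
  rw [spB_loop_eq_find?, find?_and_filter, List.filter_reverse]
  rw [show List.filter (fun q => seq.length % q == 0) (List.range' 1 seq.length)
        = divList seq.length from rfl]
  have h1 : (((divList seq.length).reverse).map (fun q => seq.length / q)).find?
        (fun p => seq.drop p == seq.take (seq.length - p)) =
      (((divList seq.length).reverse).find? fun q =>
        seq.drop (seq.length / q) == seq.take (seq.length - seq.length / q)).map
          (fun q => seq.length / q) := List.find?_map ..
  rw [List.map_reverse, map_div_divList, List.reverse_reverse] at h1
  rw [h1, Option.map_map]
  rfl

-- ===== VERDICT (by name: the statement is the Claim_ definition above) =====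
theorem smallest_period_spec : Claim_equal_smallest_period := by
  intro seq _
  unfold Spec_smallest_period
  rw [sideA, sideB]
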